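-- pv_equiv track=rewrite | github.com/zhifaceshi/leecode_python | 数学及简单矩阵/48. 旋转图像.py | generate
-- ===== SOURCE A (Python) =====
-- def generate(x, y, n):
--     a = x, y
--     b = x, y + n - 1
--     c = x + n -1, y + n - 1
--     d = x + n - 1, y
--     for i in range(n-1):
--         yield a, b, c, d
--         a = a[0], a[1] + 1
--         b = b[0] + 1, b[1]
--         c = c[0], c[1] - 1
--         d = d[0] - 1, d[1]
-- ===== SOURCE B (Python) =====
-- def generate(x, y, n):
--     for i in range(n - 1):
--         yield (x, y + i), (x + i, y + n - 1), (x + n - 1, y + n - 1 - i), (x + n - 1 - i, y)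
-- ===== Notes on version B (the rewrite author's own statement) =====
-- stated objective: simpler
-- what changed: Drops the four mutable corner accumulators and their per-iteration updates; each yielded corner tuple is computed directly from the loop index i by a closed-form expression.
import Mathlib
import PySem

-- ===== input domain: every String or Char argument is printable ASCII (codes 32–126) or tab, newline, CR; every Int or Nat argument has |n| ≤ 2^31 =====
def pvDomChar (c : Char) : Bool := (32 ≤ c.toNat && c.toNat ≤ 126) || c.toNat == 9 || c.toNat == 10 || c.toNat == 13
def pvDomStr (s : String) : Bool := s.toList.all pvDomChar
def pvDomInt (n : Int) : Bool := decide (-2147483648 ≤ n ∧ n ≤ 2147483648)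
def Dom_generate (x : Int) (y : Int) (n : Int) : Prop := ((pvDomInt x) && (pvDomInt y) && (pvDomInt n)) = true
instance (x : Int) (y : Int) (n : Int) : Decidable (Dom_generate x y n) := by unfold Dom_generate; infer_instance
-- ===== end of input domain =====

-- B drops A's four mutable corner accumulators: each yielded tuple is computed
-- directly from the loop index by a closed-form expression (objective: simpler).

-- ===== PORT A =====
-- A's loop: yield the current 4 corners, then shift each accumulator; run n-1 times.
def generateLoopA (a b c d : Int × Int) : Nat →
    List ((Int × Int) × (Int × Int) × (Int × Int) × (Int × Int))
  | 0 => []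
  | k + 1 =>
    (a, b, c, d) ::
      generateLoopA (a.1, a.2 + 1) (b.1 + 1, b.2) (c.1, c.2 - 1) (d.1 - 1, d.2) k

def generate (x : Int) (y : Int) (n : Int) :
    List ((Int × Int) × (Int × Int) × (Int × Int) × (Int × Int)) :=
  generateLoopA (x, y) (x, y + n - 1) (x + n - 1, y + n - 1) (x + n - 1, y) (n - 1).toNat

-- ===== PORT B =====
def generate_alt (x : Int) (y : Int) (n : Int) :
    List ((Int × Int) × (Int × Int) × (Int × Int) × (Int × Int)) :=
  (PySem.List.pyRange 0 (n - 1) 1).map fun i =>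
    ((x, y + i), (x + i, y + n - 1), (x + n - 1, y + n - 1 - i), (x + n - 1 - i, y))

-- ===== PRECONDITION & SPEC =====
def Spec_generate (x : Int) (y : Int) (n : Int) (out : List ((Int × Int) × (Int × Int) × (Int × Int) × (Int × Int))) : Prop := out = generate_alt x y n
instance (x : Int) (y : Int) (n : Int) (out : List ((Int × Int) × (Int × Int) × (Int × Int) × (Int × Int))) : Decidable (Spec_generate x y n out) := by unfold Spec_generate; infer_instance

-- ===== CLAIM (what is proved, stated in full; the proofs are below) =====
def Claim_equal_generate : Prop := ∀ (x : Int) (y : Int) (n : Int), Dom_generate x y n → Spec_generate x y n (generate x y n)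

-- ===== LEMMAS AND PROOFS =====

-- A's accumulators after i steps equal the closed forms at index i:
-- starting the loop at offset i, the result is B's formula mapped over indices i, i+1, ….
theorem generateLoopA_eq (x y n : Int) :
    ∀ (k : Nat) (i : Int),
      generateLoopA (x, y + i) (x + i, y + n - 1) (x + n - 1, y + n - 1 - i) (x + n - 1 - i, y) k
        = (List.range k).map fun (j : Nat) =>
            ((x, y + (i + (j : Int))), (x + (i + (j : Int)), y + n - 1),
             (x + n - 1, y + n - 1 - (i + (j : Int))), (x + n - 1 - (i + (j : Int)), y)) := by
  intro k
  induction k with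
  | zero => intro i; simp [generateLoopA]
  | succ k ih =>
    intro i
    have h := ih (i + 1)
    simp only [generateLoopA, List.range_succ_eq_map, List.map_cons, List.map_map,
      List.cons.injEq]
    refine ⟨by norm_num, ?_⟩
    have e1 : generateLoopA (x, y + i + 1) (x + i + 1, y + n - 1)
        (x + n - 1, y + n - 1 - i - 1) (x + n - 1 - i - 1, y) k
        = generateLoopA (x, y + (i + 1)) (x + (i + 1), y + n - 1)
            (x + n - 1, y + n - 1 - (i + 1)) (x + n - 1 - (i + 1), y) k := by
      ring_nf
    rw [e1, h]
    apply List.map_congr_left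
    intro j _
    simp only [Function.comp_apply]
    push_cast
    rw [show i + ((j : Int) + 1) = i + 1 + (j : Int) from by ring]

-- ===== VERDICT (by name: the statement is the Claim_ definition above) =====
theorem generate_spec : Claim_equal_generate := by
  intro x y n _
  unfold Spec_generate generate generate_alt
  rw [PySem.List.pyRange_one]
  have h0 : generateLoopA (x, y) (x, y + n - 1) (x + n - 1, y + n - 1) (x + n - 1, y) (n - 1).toNat
      = generateLoopA (x, y + 0) (x + 0, y + n - 1) (x + n - 1, y + n - 1 - 0) (x + n - 1 - 0, y) (n - 1).toNat := by
    norm_num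
  rw [h0, generateLoopA_eq]
  simp only [List.map_map, sub_zero]
  apply List.map_congr_left
  intro j _
  simp [Function.comp]
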